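-- pv_equiv track=rewrite | github.com/gospodnetic/VOB | Log.py | convert_cumulative
-- ===== SOURCE A (Python) =====
-- def convert_cumulative(value_array):
--     cumulative_array = []
--     for i in range(len(value_array)):
--         value = 0
--         for j in range(i):
--             value += value_array[j]
--         cumulative_array.append(value)
--
--     return cumulative_array
-- ===== SOURCE B (Python) =====
-- def convert_cumulative(value_array):
--     cumulative_array = []
--     acc = 0
--     for v in value_array:
--         cumulative_array.append(acc)
--         acc += v
--     return cumulative_array
-- ===== Notes on version B (the rewrite author's own statement) =====
-- stated objective: faster
-- what changed: Replaces the quadratic re-summation of the prefix for every index by a single pass carrying a running-sum accumulator.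
import Mathlib
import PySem

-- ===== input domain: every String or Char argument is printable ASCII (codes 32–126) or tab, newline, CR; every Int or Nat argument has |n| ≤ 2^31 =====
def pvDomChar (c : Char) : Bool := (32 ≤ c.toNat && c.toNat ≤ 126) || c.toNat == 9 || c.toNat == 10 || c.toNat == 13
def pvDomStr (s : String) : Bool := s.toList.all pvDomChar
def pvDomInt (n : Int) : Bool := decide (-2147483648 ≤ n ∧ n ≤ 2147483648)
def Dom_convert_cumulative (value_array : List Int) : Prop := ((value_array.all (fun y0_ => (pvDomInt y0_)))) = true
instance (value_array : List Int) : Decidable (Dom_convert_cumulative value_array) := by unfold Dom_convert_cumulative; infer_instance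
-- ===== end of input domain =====

-- B replaces A's quadratic re-summation of each prefix by a single pass with a running-sum accumulator (faster).

-- ===== PORT A =====
-- value_array[j] always has 0 ≤ j < i ≤ len, so pyGetD with default 0 is exact here (never hits the default)
def convert_cumulative (value_array : List Int) : List Int :=
  (PySem.List.pyRange 0 value_array.length 1).foldl
    (fun cumulative_array i =>
      cumulative_array ++
        [(PySem.List.pyRange 0 i 1).foldl
          (fun value j => value + PySem.List.pyGetD value_array j 0) 0]) []

-- ===== PORT B =====
def altGo : List Int → Int → List Int
  | [], _ => []
  | v :: t, acc => acc :: altGo t (acc + v)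

def convert_cumulative_alt (value_array : List Int) : List Int :=
  altGo value_array 0

-- ===== PRECONDITION & SPEC =====
def Spec_convert_cumulative (value_array : List Int) (out : List Int) : Prop := out = convert_cumulative_alt value_array
instance (value_array : List Int) (out : List Int) : Decidable (Spec_convert_cumulative value_array out) := by unfold Spec_convert_cumulative; infer_instance

-- ===== CLAIM (what is proved, stated in full; the proofs are below) =====
def Claim_equal_convert_cumulative : Prop := ∀ (value_array : List Int), Dom_convert_cumulative value_array → Spec_convert_cumulative value_array (convert_cumulative value_array)

-- ===== LEMMAS AND PROOFS =====

-- inner loop of A sums the first i elements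
theorem pvInnerSum (xs : List Int) (i : Nat) (h : i ≤ xs.length) :
    (PySem.List.pyRange 0 (i : Int) 1).foldl
      (fun value j => value + PySem.List.pyGetD xs j 0) 0 = (xs.take i).sum := by
  induction i with
  | zero => simp [PySem.List.pyRange_one_eq_nil]
  | succ n ih =>
    have : ((n + 1 : Nat) : Int) = (n : Int) + 1 := by push_cast; ring
    rw [this, PySem.List.pyRange_one_succ_right (by omega)]
    rw [List.foldl_append, ih (by omega)]
    have hlt : n < xs.length := by omega
    simp only [List.foldl_cons, List.foldl_nil, PySem.List.pyGetD_natCast]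
    rw [List.getD_eq_getElem xs 0 hlt,
      List.take_add_one, List.sum_append, List.getElem?_eq_getElem hlt]
    simp [Option.toList]

-- A computes the map of prefix sums over range(len)
theorem pvAChar (xs : List Int) :
    convert_cumulative xs = (List.range xs.length).map (fun i => (xs.take i).sum) := by
  unfold convert_cumulative
  rw [PySem.List.pyRange_zero_nat]
  rw [List.foldl_map, PySem.List.foldl_append_singleton_eq_map]
  refine List.map_congr_left ?_
  intro i hi
  exact pvInnerSum xs i (le_of_lt (List.mem_range.mp hi))

-- B's accumulator loop computes the same map, shifted by the accumulator
theorem pvBChar (xs : List Int) (acc : Int) :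
    altGo xs acc = (List.range xs.length).map (fun i => acc + (xs.take i).sum) := by
  induction xs generalizing acc with
  | nil => simp [altGo]
  | cons v t ih =>
    simp only [altGo, List.length_cons, List.range_succ_eq_map, List.map_cons, List.map_map]
    rw [ih (acc + v)]
    congr 1
    · simp
    · refine List.map_congr_left ?_
      intro i _
      simp [List.take_succ_cons]
      ring

-- ===== VERDICT (by name: the statement is the Claim_ definition above) =====
theorem convert_cumulative_spec : Claim_equal_convert_cumulative := by
  intro xs _
  show convert_cumulative xs = convert_cumulative_alt xs
  rw [pvAChar, convert_cumulative_alt, pvBChar]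
  simp
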